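-- pv_equiv track=rewrite | github.com/KaazTiel/Simplex | App.py | listar_var_RB
-- ===== SOURCE A (Python) =====
-- def buscar_coluna(varFP:list, restFP:list, foFP:dict, id_var:int) -> dict:
--     dict_coluna = {"var": varFP[id_var],
--                    "rest": None,
--                    "fo": foFP["coef"][id_var]}
--     lista_coef = []
--     for linha in restFP:
--         coef = linha["coef"][id_var]
--         lista_coef.append(coef)
--     dict_coluna['rest'] = lista_coef
--
--     return dict_coluna
--
-- def eh_base(coluna:dict) -> bool:
--     rest = list(coluna["rest"])
--     fo = coluna["fo"]
--     if rest.count(0) == len(rest) - 1 and rest.count(1) == 1 and fo == 0: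
--         return True
--     else:
--         return False
--
-- def listar_var_RB (varFP:list, restFP:list, foFP:dict) -> tuple:
--     lista_R = []
--     lista_B = []
--     quant_var = len(varFP)
--
--     for i in range(quant_var):
--         col = buscar_coluna(varFP, restFP, foFP, i)
--         if(eh_base(col)):
--             lista_B.append(col["var"])
--         else:
--             lista_R.append(col["var"])
--
--     return lista_R, lista_B
-- ===== SOURCE B (Python) =====
-- def listar_var_RB(varFP: list, restFP: list, foFP: dict) -> tuple:
--     # Row-major single pass: tally, per column, how many 1s and 0s appear,
--     # then classify every column from the tallies and a boolean mask.
--     n = len(varFP)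
--     ones = [0] * n
--     zeros = [0] * n
--     for linha in restFP:
--         coef = linha.get("coef", [])
--         ones = [o + (1 if coef[j] == 1 else 0) for j, o in enumerate(ones)]
--         zeros = [z + (1 if coef[j] == 0 else 0) for j, z in enumerate(zeros)]
--     fo = foFP.get("coef", [])
--     m = len(restFP)
--     eh = [fo[j] == 0 and ones[j] == 1 and zeros[j] == m - 1 for j in range(n)]
--     lista_R = [v for j, v in enumerate(varFP) if not eh[j]]
--     lista_B = [v for j, v in enumerate(varFP) if eh[j]]
--     return lista_R, lista_B
-- ===== Notes on version B (the rewrite author's own statement) =====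
-- stated objective: alternative
-- what changed: Replaces the columns-outer scan that rebuilds each coefficient column and counts it with a single row-major pass maintaining per-column tallies of ones and zeros, followed by one zip over the columns to classify variables.
import Mathlib
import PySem

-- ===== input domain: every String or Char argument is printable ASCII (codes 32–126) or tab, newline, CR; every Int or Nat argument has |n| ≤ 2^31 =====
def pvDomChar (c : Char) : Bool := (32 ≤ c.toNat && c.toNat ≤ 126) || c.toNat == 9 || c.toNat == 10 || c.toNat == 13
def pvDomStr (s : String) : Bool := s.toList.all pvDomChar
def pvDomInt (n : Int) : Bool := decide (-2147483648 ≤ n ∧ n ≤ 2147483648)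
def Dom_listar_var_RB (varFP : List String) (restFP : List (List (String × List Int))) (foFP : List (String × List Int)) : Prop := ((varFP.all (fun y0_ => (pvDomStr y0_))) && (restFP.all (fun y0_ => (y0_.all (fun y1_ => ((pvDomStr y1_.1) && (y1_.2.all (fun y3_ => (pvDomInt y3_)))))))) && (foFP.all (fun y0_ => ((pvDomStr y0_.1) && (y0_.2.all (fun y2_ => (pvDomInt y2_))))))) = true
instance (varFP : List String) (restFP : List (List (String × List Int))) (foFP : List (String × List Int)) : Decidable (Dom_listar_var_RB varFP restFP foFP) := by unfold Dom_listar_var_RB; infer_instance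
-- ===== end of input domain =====

-- B replaces A's columns-outer scan (rebuild column, count it) by one row-major
-- pass keeping per-column tallies of ones and zeros, then one zip to classify.

-- ===== PORT A =====
def pvBuscarColuna (varFP : List String) (restFP : List (List (String × List Int))) (foFP : List (String × List Int)) (id_var : Int) : String × List Int × Int :=
  let var := PySem.List.pyGetD varFP id_var ""
  let fo := PySem.List.pyGetD ((PySem.Dict.mk foFP).getD "coef" []) id_var 0
  let lista_coef := restFP.foldl (fun acc linha => acc ++ [PySem.List.pyGetD ((PySem.Dict.mk linha).getD "coef" []) id_var 0]) []
  (var, lista_coef, fo)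

def pvEhBase (coluna : String × List Int × Int) : Bool :=
  let rest := coluna.2.1
  let fo := coluna.2.2
  if ((rest.count 0 : Int) == (rest.length : Int) - 1 && (rest.count 1 : Int) == 1 && fo == 0) then true else false

def listar_var_RB (varFP : List String) (restFP : List (List (String × List Int))) (foFP : List (String × List Int)) : List String × List String :=
  (PySem.List.pyRange 0 (varFP.length : Int) 1).foldl
    (fun acc i =>
      let col := pvBuscarColuna varFP restFP foFP i
      if pvEhBase col then (acc.1, acc.2 ++ [col.1]) else (acc.1 ++ [col.1], acc.2))
    ([], [])

-- ===== PORT B =====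
def pvTally (oz : List Int × List Int) (linha : List (String × List Int)) : List Int × List Int :=
  let coef := (PySem.Dict.mk linha).getD "coef" []
  ((PySem.List.enumerate oz.1 0).map (fun p => p.2 + (if PySem.List.pyGetD coef p.1 0 == 1 then 1 else 0)),
   (PySem.List.enumerate oz.2 0).map (fun p => p.2 + (if PySem.List.pyGetD coef p.1 0 == 0 then 1 else 0)))

def listar_var_RB_alt (varFP : List String) (restFP : List (List (String × List Int))) (foFP : List (String × List Int)) : List String × List String :=
  let n := varFP.length
  let oz := restFP.foldl pvTally (List.replicate n 0, List.replicate n 0)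
  let fo := (PySem.Dict.mk foFP).getD "coef" []
  let m := (restFP.length : Int)
  let eh := (PySem.List.pyRange 0 (n : Int) 1).map (fun j =>
      PySem.List.pyGetD fo j 0 == 0 && (PySem.List.pyGetD oz.1 j 0 == 1 && PySem.List.pyGetD oz.2 j 0 == m - 1))
  let lista_R := ((PySem.List.enumerate varFP 0).filter (fun p => !(PySem.List.pyGetD eh p.1 false))).map (fun p => p.2)
  let lista_B := ((PySem.List.enumerate varFP 0).filter (fun p => PySem.List.pyGetD eh p.1 false)).map (fun p => p.2)
  (lista_R, lista_B)

-- ===== PRECONDITION & SPEC =====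
-- Pre_ excludes exactly the inputs where A raises: a restriction row or the
-- objective whose "coef" entry is missing or shorter than the variable list
-- (KeyError / IndexError in buscar_coluna).
def Pre_listar_var_RB (varFP : List String) (restFP : List (List (String × List Int))) (foFP : List (String × List Int)) : Prop :=
  (varFP = [] ∨ varFP.length ≤ ((PySem.Dict.mk foFP).getD "coef" []).length ∧ ((PySem.Dict.mk foFP).contains "coef") = true) ∧
  ∀ linha ∈ restFP, varFP = [] ∨ varFP.length ≤ ((PySem.Dict.mk linha).getD "coef" []).length ∧ ((PySem.Dict.mk linha).contains "coef") = true
instance (varFP : List String) (restFP : List (List (String × List Int))) (foFP : List (String × List Int)) : Decidable (Pre_listar_var_RB varFP restFP foFP) := by unfold Pre_listar_var_RB; infer_instance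

def pvWitness_listar_var_RB : List String × (List (List (String × List Int))) × (List (String × List Int)) :=
  (["x1", "x2"], [[("coef", [1, 0])], [("coef", [0, 1])]], [("coef", [0, 2])])

def Spec_listar_var_RB (varFP : List String) (restFP : List (List (String × List Int))) (foFP : List (String × List Int)) (out : List String × List String) : Prop := out = listar_var_RB_alt varFP restFP foFP
instance (varFP : List String) (restFP : List (List (String × List Int))) (foFP : List (String × List Int)) (out : List String × List String) : Decidable (Spec_listar_var_RB varFP restFP foFP out) := by unfold Spec_listar_var_RB; infer_instance

-- ===== CLAIM (what is proved, stated in full; the proofs are below) =====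
def Claim_equal_listar_var_RB : Prop := ∀ (varFP : List String) (restFP : List (List (String × List Int))) (foFP : List (String × List Int)), Dom_listar_var_RB varFP restFP foFP → Pre_listar_var_RB varFP restFP foFP → Spec_listar_var_RB varFP restFP foFP (listar_var_RB varFP restFP foFP)

-- ===== LEMMAS AND PROOFS =====

-- column k of the restriction matrix
def pvCol (restFP : List (List (String × List Int))) (k : Nat) : List Int :=
  restFP.map (fun linha => ((PySem.Dict.mk linha).getD "coef" []).getD k 0)

theorem pvMapRangeCongr {α : Type} {n : Nat} {f g : Nat → α}
    (h : ∀ k, k < n → f k = g k) : (List.range n).map f = (List.range n).map g := by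
  apply List.ext_getElem (by simp)
  intro k hk _
  simp only [List.getElem_map, List.getElem_range]
  exact h k (by simpa using hk)

-- one row of B's tally update, characterised pointwise
theorem pvRow_len (os coef : List Int) (c : Int) :
    ((PySem.List.enumerate os 0).map (fun p => p.2 + (if PySem.List.pyGetD coef p.1 0 == c then 1 else 0))).length
      = os.length := by
  simp [PySem.List.length_enumerate]

theorem pvRow_getD (os coef : List Int) (c : Int) (k : Nat) (hk : k < os.length) (hkc : k < coef.length) :
    ((PySem.List.enumerate os 0).map (fun p => p.2 + (if PySem.List.pyGetD coef p.1 0 == c then 1 else 0))).getD k 0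
      = os[k] + (if coef[k] == c then 1 else 0) := by
  rw [List.getD_eq_getElem?_getD, PySem.List.enumerate_eq_map_pyRange os 0, List.map_map,
      PySem.List.len_eq, PySem.List.getElem?_map_pyRange_zero _ _ _ hk]
  simp only [Function.comp, Option.getD_some]
  rw [PySem.List.pyGetD_natCast, PySem.List.pyGetD_natCast,
      List.getD_eq_getElem _ _ hk, List.getD_eq_getElem _ _ hkc]

-- B's tally fold, characterised as per-column counts
theorem pvTally_spec (restFP : List (List (String × List Int))) (os zs : List Int)
    (hlen : zs.length = os.length)
    (h : ∀ linha ∈ restFP, os.length ≤ ((PySem.Dict.mk linha).getD "coef" []).length) :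
    restFP.foldl pvTally (os, zs)
      = ((List.range os.length).map (fun k => os.getD k 0 + ((pvCol restFP k).count 1 : Int)),
         (List.range os.length).map (fun k => zs.getD k 0 + ((pvCol restFP k).count 0 : Int))) := by
  induction restFP generalizing os zs with
  | nil =>
    refine Prod.ext ?_ ?_ <;> simp only [List.foldl_nil]
    · apply List.ext_getElem (by simp)
      intro k hk _
      simp [pvCol, hk]
    · apply List.ext_getElem (by simp [hlen])
      intro k hk _
      simp [pvCol, hk]
  | cons linha rest ih =>
    have hcoef : os.length ≤ ((PySem.Dict.mk linha).getD "coef" []).length := h linha (by simp)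
    set coef := (PySem.Dict.mk linha).getD "coef" [] with hc
    rw [List.foldl_cons]
    show List.foldl pvTally
        ((PySem.List.enumerate os 0).map (fun p => p.2 + (if PySem.List.pyGetD coef p.1 0 == 1 then 1 else 0)),
         (PySem.List.enumerate zs 0).map (fun p => p.2 + (if PySem.List.pyGetD coef p.1 0 == 0 then 1 else 0))) rest = _
    rw [ih _ _ (by rw [pvRow_len, pvRow_len, hlen]) (by intro l hl; rw [pvRow_len]; exact h l (by simp [hl]))]
    rw [pvRow_len]
    refine Prod.ext ?_ ?_ <;> simp only
    · apply pvMapRangeCongr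
      intro k hk
      have hkc : k < coef.length := lt_of_lt_of_le hk hcoef
      rw [pvRow_getD os coef 1 k hk hkc, List.getD_eq_getElem _ _ hk]
      have : pvCol (linha :: rest) k = coef.getD k 0 :: pvCol rest k := by simp [pvCol, hc]
      rw [this, List.count_cons, List.getD_eq_getElem _ _ hkc]
      push_cast
      by_cases h1 : coef[k] = 1
      · simp [h1]
        ring
      · simp [h1]
    · apply pvMapRangeCongr
      intro k hk
      have hkz : k < zs.length := hlen ▸ hk
      have hkc : k < coef.length := lt_of_lt_of_le hk hcoef
      rw [pvRow_getD zs coef 0 k hkz hkc, List.getD_eq_getElem _ _ hkz]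
      have : pvCol (linha :: rest) k = coef.getD k 0 :: pvCol rest k := by simp [pvCol, hc]
      rw [this, List.count_cons, List.getD_eq_getElem _ _ hkc]
      push_cast
      by_cases h0 : coef[k] = 0
      · simp [h0]
        ring
      · simp [h0]

-- generic two-bucket partition fold
theorem pvPartition_fold {α β : Type} (l : List α) (Q : α → Bool) (v : α → β) (accR accB : List β) :
    l.foldl (fun acc x => if Q x then (acc.1, acc.2 ++ [v x]) else (acc.1 ++ [v x], acc.2)) (accR, accB)
      = (accR ++ (l.filter (fun x => !(Q x))).map v, accB ++ (l.filter Q).map v) := by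
  induction l generalizing accR accB with
  | nil => simp
  | cons x l ih =>
    by_cases hx : Q x <;> simp [hx, ih]

theorem pvMain (varFP : List String) (restFP : List (List (String × List Int))) (foFP : List (String × List Int))
    (hpre : Pre_listar_var_RB varFP restFP foFP) :
    listar_var_RB varFP restFP foFP = listar_var_RB_alt varFP restFP foFP := by
  obtain ⟨hfo', hrest'⟩ := hpre
  by_cases hvar : varFP = []
  · subst hvar
    simp [listar_var_RB, listar_var_RB_alt, PySem.List.pyRange_one_eq_nil le_rfl, PySem.List.enumerate]
  have hfo : varFP.length ≤ ((PySem.Dict.mk foFP).getD "coef" []).length := (hfo'.resolve_left hvar).1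
  have hrest : ∀ l ∈ restFP, varFP.length ≤ ((PySem.Dict.mk l).getD "coef" []).length :=
    fun l hl => ((hrest' l hl).resolve_left hvar).1
  set n := varFP.length with hn
  set fo := (PySem.Dict.mk foFP).getD "coef" [] with hfov
  set m := (restFP.length : Int) with hm
  -- the tallies B computes
  have hoz := pvTally_spec restFP (List.replicate n 0) (List.replicate n 0) (by simp) (by simpa using hrest)
  have hrep : ∀ k : Nat, (List.replicate n (0:Int)).getD k 0 = 0 := by
    intro k
    by_cases hk : k < n
    · simp [hk]
    · simp [List.getD_eq_getElem?_getD, hk]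
  simp only [hrep, List.length_replicate, zero_add] at hoz
  set ones := (List.range n).map (fun k => ((pvCol restFP k).count 1 : Int)) with hones
  set zeros := (List.range n).map (fun k => ((pvCol restFP k).count 0 : Int)) with hzeros
  -- B's basic-column mask, as a function of the column index
  set QB : Int → Bool := fun j =>
    PySem.List.pyGetD fo j 0 == 0 && (PySem.List.pyGetD ones j 0 == 1 && PySem.List.pyGetD zeros j 0 == m - 1)
    with hQB
  set VB : Int → String := fun j => PySem.List.pyGetD varFP j "" with hVB
  have hQBk : ∀ k : Nat, k < n →
      QB (k : Int) = (PySem.List.pyGetD fo (k : Int) 0 == 0 &&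
        (((pvCol restFP k).count 1 : Int) == 1 && ((pvCol restFP k).count 0 : Int) == m - 1)) := by
    intro k hk
    rw [hQB]
    simp only
    rw [hones, hzeros, PySem.List.pyGetD_natCast, PySem.List.pyGetD_natCast, PySem.List.pyGetD_natCast,
        PySem.List.getD_map_range _ _ _ _ (by simpa using hk),
        PySem.List.getD_map_range _ _ _ _ (by simpa using hk)]
  -- A's loop body, rewritten through the mask
  have hbody : ∀ acc : List String × List String, ∀ i ∈ PySem.List.pyRange 0 (n:Int) 1,
      (let col := pvBuscarColuna varFP restFP foFP i
       if pvEhBase col then (acc.1, acc.2 ++ [col.1]) else (acc.1 ++ [col.1], acc.2))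
      = (if QB i then (acc.1, acc.2 ++ [VB i]) else (acc.1 ++ [VB i], acc.2)) := by
    intro acc i hi
    rw [PySem.List.mem_pyRange_one] at hi
    obtain ⟨hi0, hin⟩ := hi
    obtain ⟨k, rfl⟩ : ∃ k : Nat, i = (k : Int) := ⟨i.toNat, (Int.toNat_of_nonneg hi0).symm⟩
    have hkn : k < n := by exact_mod_cast hin
    have hcolrest : restFP.foldl (fun acc linha => acc ++ [PySem.List.pyGetD ((PySem.Dict.mk linha).getD "coef" []) (k : Int) 0]) []
        = pvCol restFP k := by
      rw [PySem.List.foldl_append_singleton_eq_map]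
      simp only [List.nil_append, pvCol]
      apply List.map_congr_left
      intro l hl
      rw [PySem.List.pyGetD_natCast]
    rw [hQBk k hkn]
    simp only [pvBuscarColuna, pvEhBase, hcolrest, hVB]
    have hcl : (pvCol restFP k).length = restFP.length := by simp [pvCol]
    rw [hcl, ← hfov, ← hm]
    have hb : ∀ b : Bool, (if b = true then true else false) = b := fun b => by cases b <;> rfl
    simp only [hb]
    have hcomm : ∀ a b c : Bool, (a && b && c) = (c && (b && a)) := by decide
    rw [hcomm]
  -- fold over the range becomes a partition by the mask
  unfold listar_var_RB
  rw [PySem.List.foldl_congr_mem _ _ _ _ hbody,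
      pvPartition_fold (PySem.List.pyRange 0 (n:Int) 1) QB VB [] []]
  -- B's comprehensions compute the same partition
  unfold listar_var_RB_alt
  simp only [List.nil_append]
  rw [← hn, ← hfov, hoz, ← hm]
  simp only
  rw [← hQB, PySem.List.enumerate_eq_map_pyRange varFP ""]
  rw [PySem.List.len_eq, ← hn, List.filter_map, List.filter_map, List.map_map, List.map_map]
  refine Prod.ext ?_ ?_ <;> simp only
  · rw [List.filter_congr (fun j hj => ?_)]
    · rfl
    · have h1 := (PySem.List.mem_pyRange_one.mp hj).1
      have h2 := (PySem.List.mem_pyRange_one.mp hj).2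
      simp [Function.comp, PySem.List.pyGetD_map_pyRange_of_nonneg _ _ _ _ h1 h2]
  · rw [List.filter_congr (fun j hj => ?_)]
    · rfl
    · have h1 := (PySem.List.mem_pyRange_one.mp hj).1
      have h2 := (PySem.List.mem_pyRange_one.mp hj).2
      simp [Function.comp, PySem.List.pyGetD_map_pyRange_of_nonneg _ _ _ _ h1 h2]

-- ===== VERDICT (by name: the statement is the Claim_ definition above) =====
theorem listar_var_RB_spec : Claim_equal_listar_var_RB := by
  intro varFP restFP foFP _hdom hpre
  exact pvMain varFP restFP foFP hpre
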